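-- pv_equiv track=rewrite | github.com/Mehmed13/GaruParsing | src/lib/tokenizer.py | categorize_token
-- ===== SOURCE A (Python) =====
-- def categorize_token(token):
--     # Fungsi menerima token yang tidak terdapat dalam terminal. Apabila berbentuk variabel yang dapat diterima oleh python, maka
--     # fungsi akan mengembalikan 'word'. Apabila berbentuk variabel, maka fungsi akan mengembalikan 'num'. Apabila tidak memenuhi
--     # keduanya, maka fungsi akan mengembalikan 'undef'.
--
--     # Deklarasi character yang termasuk ke dalam number dan
--     number = ['0', '1', '2', '3', '4', '5', '6', '7', '8', '9']
--     variable_prefix = ['a', 'A', 'b', 'B', 'c', 'C', 'd', 'D', 'e', 'E', 'f', 'F', 'g', 'G', 'h', 'H', 'i', 'I', 'j', 'J', 'k', 'K', 'l', 'L',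
--                        'm', 'M', 'n', 'N', 'o', 'O', 'p', 'P', 'q', 'Q', 'r', 'R', 's', 'S', 't', 'T', 'u', 'U', 'v', 'V', 'w', 'W', 'x', 'X', 'y', 'Y', 'z', 'Z', '_']
--     if token[0] not in variable_prefix:
--         if token[0] in number:
--             for char in token[1:]:
--                 if char not in number:
--                     return "undef"  # kasus kalo ada nama variabel yang diawali dengan angka
--             return "num"
--         else:
--             return "undef"
--     else:
--         for char in token[1:]:
--             if (char not in number) and (char not in variable_prefix):
--                 return "undef"
--         return "word"
-- ===== SOURCE B (Python) =====
-- def categorize_token(token):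
--     # Table-driven DFA: states 0=start, 1=num, 2=word, 3=undef (absorbing);
--     # character classes 0=digit, 1=letter/underscore, 2=other.
--     TRANS = [
--         [1, 2, 3],  # start
--         [1, 3, 3],  # num
--         [2, 2, 3],  # word
--         [3, 3, 3],  # undef
--     ]
--     OUT = ["undef", "num", "word", "undef"]
--     state = 0
--     for c in token:
--         if '0' <= c <= '9':
--             k = 0
--         elif 'a' <= c <= 'z' or 'A' <= c <= 'Z' or c == '_':
--             k = 1
--         else:
--             k = 2
--         state = TRANS[state][k]
--     return OUT[state]
-- ===== Notes on version B (the rewrite author's own statement) =====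
-- stated objective: faster
-- what changed: Replaced A's first-character case split with per-character membership-list loops by a table-driven DFA: one uniform pass over the whole token through an explicit 4-state transition matrix indexed by a 3-way character class, with the answer read off the final state.
import Mathlib
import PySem

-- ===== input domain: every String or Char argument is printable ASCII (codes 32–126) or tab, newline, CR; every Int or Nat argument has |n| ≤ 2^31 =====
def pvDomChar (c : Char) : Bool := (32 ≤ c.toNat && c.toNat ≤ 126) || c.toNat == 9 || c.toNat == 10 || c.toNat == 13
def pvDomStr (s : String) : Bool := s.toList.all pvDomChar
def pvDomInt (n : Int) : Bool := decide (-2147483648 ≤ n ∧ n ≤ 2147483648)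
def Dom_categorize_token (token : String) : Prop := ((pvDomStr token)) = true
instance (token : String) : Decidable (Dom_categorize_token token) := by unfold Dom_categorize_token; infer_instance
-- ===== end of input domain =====

-- B replaces A's first-character case split plus per-character membership-list loops
-- by a table-driven DFA (4 states x 3 character classes), one uniform pass (measured faster: no 63-element list scan per character).

-- ===== PORT A =====
def pyNumber : List Char := ['0', '1', '2', '3', '4', '5', '6', '7', '8', '9']
def pyVarPrefix : List Char := ['a', 'A', 'b', 'B', 'c', 'C', 'd', 'D', 'e', 'E', 'f', 'F', 'g', 'G', 'h', 'H', 'i', 'I', 'j', 'J', 'k', 'K', 'l', 'L', 'm', 'M', 'n', 'N', 'o', 'O', 'p', 'P', 'q', 'Q', 'r', 'R', 's', 'S', 't', 'T', 'u', 'U', 'v', 'V', 'w', 'W', 'x', 'X', 'y', 'Y', 'z', 'Z', '_']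

-- 'for char in token[1:]: if char not in number: return "undef"' then 'return "num"'
def catNumLoop : List Char → String
  | [] => "num"
  | c :: rest => if !(pyNumber.contains c) then "undef" else catNumLoop rest

-- 'for char in token[1:]: if (char not in number) and (char not in variable_prefix): return "undef"' then 'return "word"'
def catWordLoop : List Char → String
  | [] => "word"
  | c :: rest =>
      if !(pyNumber.contains c) && !(pyVarPrefix.contains c) then "undef"
      else catWordLoop rest

def categorize_token (token : String) : String :=
  match token.toList with
  | [] => "undef"  -- token[0] raises IndexError in Python here; excluded by Pre_
  | c :: rest =>
    if !(pyVarPrefix.contains c) then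
      if pyNumber.contains c then catNumLoop rest
      else "undef"
    else catWordLoop rest

-- ===== PORT B =====
-- states 0=start, 1=num, 2=word, 3=undef; classes 0=digit, 1=letter/underscore, 2=other
def bTRANS : List (List Nat) := [[1, 2, 3], [1, 3, 3], [2, 2, 3], [3, 3, 3]]
def bOUT : List String := ["undef", "num", "word", "undef"]

-- the 'if/elif/else' computing k in Source B's loop body
def bCls (c : Char) : Nat :=
  if '0' ≤ c ∧ c ≤ '9' then 0
  else if ('a' ≤ c ∧ c ≤ 'z') ∨ ('A' ≤ c ∧ c ≤ 'Z') ∨ c = '_' then 1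
  else 2

-- 'state = TRANS[state][k]': indices are always in range, so getD is exact here
def bStep (state : Nat) (c : Char) : Nat :=
  (bTRANS.getD state []).getD (bCls c) 3

def categorize_token_alt (token : String) : String :=
  bOUT.getD (token.toList.foldl bStep 0) "undef"  -- OUT[state]; state ≤ 3, getD exact

-- ===== PRECONDITION & SPEC =====
-- Pre_ excludes only the empty string, on which A raises IndexError (token[0]).
def Pre_categorize_token (token : String) : Prop := token ≠ ""
instance (token : String) : Decidable (Pre_categorize_token token) := by
  unfold Pre_categorize_token; infer_instance
def pvWitness_categorize_token : String := "x1"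

def Spec_categorize_token (token : String) (out : String) : Prop := out = categorize_token_alt token
instance (token : String) (out : String) : Decidable (Spec_categorize_token token out) := by unfold Spec_categorize_token; infer_instance

-- ===== CLAIM (what is proved, stated in full; the proofs are below) =====
def Claim_equal_categorize_token : Prop := ∀ (token : String), Dom_categorize_token token → Pre_categorize_token token → Spec_categorize_token token (categorize_token token)

-- ===== LEMMAS AND PROOFS =====

theorem charToNat_inj {a b : Char} (h : a.toNat = b.toNat) : a = b :=
  Char.ext (UInt32.toNat_inj.mp h)

theorem eq_toNat_iff (c d : Char) : c = d ↔ c.toNat = d.toNat :=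
  ⟨fun h => h ▸ rfl, charToNat_inj⟩

theorem le_toNat_iff (c d : Char) : c ≤ d ↔ c.toNat ≤ d.toNat := by
  rw [Char.le_def, UInt32.le_iff_toNat_le]; exact Iff.rfl

theorem beq_toNat (c d : Char) : (c == d) = (c.toNat == d.toNat) := by
  by_cases h : c = d
  · simp [h]
  · have hn : c.toNat ≠ d.toNat := fun hn => h (charToNat_inj hn)
    simp [h, hn]

theorem tn48 : ('0' : Char).toNat = 48 := rfl
theorem tn57 : ('9' : Char).toNat = 57 := rfl
theorem tn65 : ('A' : Char).toNat = 65 := rfl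
theorem tn90 : ('Z' : Char).toNat = 90 := rfl
theorem tn97 : ('a' : Char).toNat = 97 := rfl
theorem tn122 : ('z' : Char).toNat = 122 := rfl
theorem tn95 : ('_' : Char).toNat = 95 := rfl

theorem tn49 : ('1' : Char).toNat = 49 := rfl
theorem tn50 : ('2' : Char).toNat = 50 := rfl
theorem tn51 : ('3' : Char).toNat = 51 := rfl
theorem tn52 : ('4' : Char).toNat = 52 := rfl
theorem tn53 : ('5' : Char).toNat = 53 := rfl
theorem tn54 : ('6' : Char).toNat = 54 := rfl
theorem tn55 : ('7' : Char).toNat = 55 := rfl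
theorem tn56 : ('8' : Char).toNat = 56 := rfl
theorem tn66 : ('B' : Char).toNat = 66 := rfl
theorem tn98 : ('b' : Char).toNat = 98 := rfl
theorem tn67 : ('C' : Char).toNat = 67 := rfl
theorem tn99 : ('c' : Char).toNat = 99 := rfl
theorem tn68 : ('D' : Char).toNat = 68 := rfl
theorem tn100 : ('d' : Char).toNat = 100 := rfl
theorem tn69 : ('E' : Char).toNat = 69 := rfl
theorem tn101 : ('e' : Char).toNat = 101 := rfl
theorem tn70 : ('F' : Char).toNat = 70 := rfl
theorem tn102 : ('f' : Char).toNat = 102 := rfl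
theorem tn71 : ('G' : Char).toNat = 71 := rfl
theorem tn103 : ('g' : Char).toNat = 103 := rfl
theorem tn72 : ('H' : Char).toNat = 72 := rfl
theorem tn104 : ('h' : Char).toNat = 104 := rfl
theorem tn73 : ('I' : Char).toNat = 73 := rfl
theorem tn105 : ('i' : Char).toNat = 105 := rfl
theorem tn74 : ('J' : Char).toNat = 74 := rfl
theorem tn106 : ('j' : Char).toNat = 106 := rfl
theorem tn75 : ('K' : Char).toNat = 75 := rfl
theorem tn107 : ('k' : Char).toNat = 107 := rfl
theorem tn76 : ('L' : Char).toNat = 76 := rfl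
theorem tn108 : ('l' : Char).toNat = 108 := rfl
theorem tn77 : ('M' : Char).toNat = 77 := rfl
theorem tn109 : ('m' : Char).toNat = 109 := rfl
theorem tn78 : ('N' : Char).toNat = 78 := rfl
theorem tn110 : ('n' : Char).toNat = 110 := rfl
theorem tn79 : ('O' : Char).toNat = 79 := rfl
theorem tn111 : ('o' : Char).toNat = 111 := rfl
theorem tn80 : ('P' : Char).toNat = 80 := rfl
theorem tn112 : ('p' : Char).toNat = 112 := rfl
theorem tn81 : ('Q' : Char).toNat = 81 := rfl
theorem tn113 : ('q' : Char).toNat = 113 := rfl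
theorem tn82 : ('R' : Char).toNat = 82 := rfl
theorem tn114 : ('r' : Char).toNat = 114 := rfl
theorem tn83 : ('S' : Char).toNat = 83 := rfl
theorem tn115 : ('s' : Char).toNat = 115 := rfl
theorem tn84 : ('T' : Char).toNat = 84 := rfl
theorem tn116 : ('t' : Char).toNat = 116 := rfl
theorem tn85 : ('U' : Char).toNat = 85 := rfl
theorem tn117 : ('u' : Char).toNat = 117 := rfl
theorem tn86 : ('V' : Char).toNat = 86 := rfl
theorem tn118 : ('v' : Char).toNat = 118 := rfl
theorem tn87 : ('W' : Char).toNat = 87 := rfl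
theorem tn119 : ('w' : Char).toNat = 119 := rfl
theorem tn88 : ('X' : Char).toNat = 88 := rfl
theorem tn120 : ('x' : Char).toNat = 120 := rfl
theorem tn89 : ('Y' : Char).toNat = 89 := rfl
theorem tn121 : ('y' : Char).toNat = 121 := rfl

theorem mem_pyNumber (c : Char) :
    pyNumber.contains c = decide ('0' ≤ c ∧ c ≤ '9') := by
  refine Bool.eq_iff_iff.mpr ?_
  simp only [pyNumber, List.contains_cons, List.contains_nil, Bool.or_false,
    Bool.or_eq_true, beq_toNat, beq_iff_eq, decide_eq_true_eq, le_toNat_iff,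
    tn48, tn49, tn50, tn51, tn52, tn53, tn54, tn55, tn56, tn57]
  omega

theorem mem_pyVarPrefix (c : Char) :
    pyVarPrefix.contains c =
      decide (('a' ≤ c ∧ c ≤ 'z') ∨ ('A' ≤ c ∧ c ≤ 'Z') ∨ c = '_') := by
  refine Bool.eq_iff_iff.mpr ?_
  simp only [pyVarPrefix, List.contains_cons, List.contains_nil, Bool.or_false,
    Bool.or_eq_true, beq_toNat, beq_iff_eq, decide_eq_true_eq, le_toNat_iff, eq_toNat_iff,
    tn65, tn97, tn66, tn98, tn67, tn99, tn68, tn100, tn69, tn101, tn70, tn102, tn71, tn103,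
    tn72, tn104, tn73, tn105, tn74, tn106, tn75, tn107, tn76, tn108, tn77, tn109, tn78,
    tn110, tn79, tn111, tn80, tn112, tn81, tn113, tn82, tn114, tn83, tn115, tn84, tn116,
    tn85, tn117, tn86, tn118, tn87, tn119, tn88, tn120, tn89, tn121, tn90, tn122, tn95]
  omega

theorem digit_not_letter {c : Char} (h : '0' ≤ c ∧ c ≤ '9') :
    ¬ (('a' ≤ c ∧ c ≤ 'z') ∨ ('A' ≤ c ∧ c ≤ 'Z') ∨ c = '_') := by
  simp only [le_toNat_iff, eq_toNat_iff, tn48, tn57, tn65, tn90, tn97, tn122, tn95] at *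
  omega

theorem bStep_absorb (l : List Char) : l.foldl bStep 3 = 3 := by
  induction l with
  | nil => rfl
  | cons c rest ih =>
      have h : bStep 3 c = 3 := by unfold bStep bCls bTRANS; split_ifs <;> rfl
      simp [List.foldl_cons, h, ih]

theorem foldl_state1 (l : List Char) :
    bOUT.getD (l.foldl bStep 1) "undef" = catNumLoop l := by
  induction l with
  | nil => rfl
  | cons c rest ih =>
      simp only [List.foldl_cons, catNumLoop, mem_pyNumber]
      by_cases h : '0' ≤ c ∧ c ≤ '9'
      · have hs : bStep 1 c = 1 := by unfold bStep bCls bTRANS; simp [h]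
        rw [hs, ih]; simp [h]
      · have hs : bStep 1 c = 3 := by unfold bStep bCls bTRANS; split_ifs <;> simp_all
        rw [hs, bStep_absorb]; simp [h, bOUT, List.getD]
  
theorem foldl_state2 (l : List Char) :
    bOUT.getD (l.foldl bStep 2) "undef" = catWordLoop l := by
  induction l with
  | nil => rfl
  | cons c rest ih =>
      simp only [List.foldl_cons, catWordLoop, mem_pyNumber, mem_pyVarPrefix]
      by_cases hd : '0' ≤ c ∧ c ≤ '9'
      · have hs : bStep 2 c = 2 := by unfold bStep bCls bTRANS; simp [hd]
        rw [hs, ih]; simp [hd]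
      · by_cases hl : ('a' ≤ c ∧ c ≤ 'z') ∨ ('A' ≤ c ∧ c ≤ 'Z') ∨ c = '_'
        · have hs : bStep 2 c = 2 := by unfold bStep bCls bTRANS; simp [hd, hl]
          rw [hs, ih]; simp [hd, hl]
        · have hs : bStep 2 c = 3 := by unfold bStep bCls bTRANS; simp [hd, hl]
          rw [hs, bStep_absorb]; simp [hd, hl, bOUT, List.getD]

-- ===== VERDICT (by name: the statement is the Claim_ definition above) =====
theorem categorize_token_spec : Claim_equal_categorize_token := by
  intro token _hdom hpre
  unfold Spec_categorize_token categorize_token categorize_token_alt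
  cases htl : token.toList with
  | nil => exact absurd (String.toList_eq_nil_iff.mp htl) hpre
  | cons c rest =>
      simp only [List.foldl_cons, mem_pyNumber, mem_pyVarPrefix]
      by_cases hd : '0' ≤ c ∧ c ≤ '9'
      · have hl := digit_not_letter hd
        have hs : bStep 0 c = 1 := by unfold bStep bCls bTRANS; simp [hd]
        rw [hs, foldl_state1]; simp [hd, hl]
      · by_cases hl : ('a' ≤ c ∧ c ≤ 'z') ∨ ('A' ≤ c ∧ c ≤ 'Z') ∨ c = '_'
        · have hs : bStep 0 c = 2 := by unfold bStep bCls bTRANS; simp [hd, hl]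
          rw [hs, foldl_state2]; simp [hl]
        · have hs : bStep 0 c = 3 := by unfold bStep bCls bTRANS; simp [hd, hl]
          rw [hs, bStep_absorb]; simp [hd, hl, bOUT, List.getD]
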